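-- pv_equiv track=rewrite | github.com/blzzua/codewars | 6-kyu/simple_fun_110_array_operations.py | array_operations
-- ===== SOURCE A (Python) =====
-- def array_operations(a, k):
--     if k == 0:
--         return a
--     else:
--         m = max(a)
--         for i, x in enumerate(a):
--             a[i] = m - x
--         if k % 2 == 1:
--             return a
--         else:
--             return array_operations(a, k-1)
-- ===== SOURCE B (Python) =====
-- def array_operations(a, k):
--     # Flat loop: pass count from k's parity instead of recursion.
--     # Mutates a in place, like the original.
--     passes = 0 if k == 0 else (1 if k % 2 == 1 else 2)
--     for _ in range(passes):
--         m = max(a)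
--         for i in range(len(a)):
--             a[i] = m - a[i]
--     return a
-- ===== Notes on version B (the rewrite author's own statement) =====
-- stated objective: simpler
-- what changed: Replaces A's tail recursion (whose depth depends on k's parity) by computing the pass count (0, 1, or 2) directly from k and running a flat loop of max-minus-element passes.
import Mathlib
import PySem

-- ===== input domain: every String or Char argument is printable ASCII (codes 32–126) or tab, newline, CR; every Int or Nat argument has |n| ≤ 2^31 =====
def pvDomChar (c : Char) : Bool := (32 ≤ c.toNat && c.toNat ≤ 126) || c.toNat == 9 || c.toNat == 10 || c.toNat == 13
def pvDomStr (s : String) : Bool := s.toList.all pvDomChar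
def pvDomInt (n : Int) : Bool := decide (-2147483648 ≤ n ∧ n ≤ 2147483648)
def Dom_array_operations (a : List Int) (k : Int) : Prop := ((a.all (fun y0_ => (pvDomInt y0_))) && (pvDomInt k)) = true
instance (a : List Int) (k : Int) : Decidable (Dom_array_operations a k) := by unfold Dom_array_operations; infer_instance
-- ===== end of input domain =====

-- B computes the pass count (0/1/2) from k's parity and runs a flat loop instead of A's recursion; equivalence is about the return value (both Pythons mutate a in place).
-- ===== PORT A =====
def array_operations (a : List Int) (k : Int) : List Int :=
  if k = 0 then a
  else
    let m := (PySem.List.max? a (fun x => x)).getD 0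
    let a' := a.map (fun x => m - x)
    if PySem.Int.mod k 2 = 1 then a'
    else array_operations a' (k - 1)
termination_by (if PySem.Int.mod k 2 = 1 then 0 else 1 : Nat)
decreasing_by
  simp only [PySem.Int.mod_eq_emod_of_pos (by norm_num : (0:Int) < 2)] at *
  split_ifs <;> omega

-- ===== PORT B =====
def array_operations_alt (a : List Int) (k : Int) : List Int :=
  let passes : Nat := if k = 0 then 0 else if PySem.Int.mod k 2 = 1 then 1 else 2
  (List.range passes).foldl
    (fun acc _ =>
      let m := (PySem.List.max? acc (fun x => x)).getD 0
      acc.map (fun x => m - x)) a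

-- ===== PRECONDITION & SPEC =====
-- Pre_ excludes only the inputs where the Python A raises: max([]) is a ValueError when k != 0.
def Pre_array_operations (a : List Int) (k : Int) : Prop := k = 0 ∨ a ≠ []
instance (a : List Int) (k : Int) : Decidable (Pre_array_operations a k) := by unfold Pre_array_operations; infer_instance
def pvWitness_array_operations : List Int × Int := ([1, 2, 5], 2)

def Spec_array_operations (a : List Int) (k : Int) (out : List Int) : Prop := out = array_operations_alt a k
instance (a : List Int) (k : Int) (out : List Int) : Decidable (Spec_array_operations a k out) := by unfold Spec_array_operations; infer_instance

-- ===== CLAIM (what is proved, stated in full; the proofs are below) =====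
def Claim_equal_array_operations : Prop := ∀ (a : List Int) (k : Int), Dom_array_operations a k → Pre_array_operations a k → Spec_array_operations a k (array_operations a k)

-- ===== LEMMAS AND PROOFS =====

-- ===== VERDICT (by name: the statement is the Claim_ definition above) =====
theorem array_operations_spec : Claim_equal_array_operations := by
  intro a k hdom hpre
  unfold Spec_array_operations array_operations_alt
  have h2 : PySem.Int.mod k 2 = k % 2 := PySem.Int.mod_eq_emod_of_pos (by norm_num)
  have step : ∀ (b : List Int) (j : Int), j ≠ 0 → j % 2 = 1 →
      array_operations b j = b.map (fun x => (PySem.List.max? b (fun x => x)).getD 0 - x) := by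
    intro b j hj hjm
    rw [array_operations.eq_def]
    simp [hj, hjm]
  by_cases hk0 : k = 0
  · rw [array_operations.eq_def]
    simp [hk0]
  · by_cases hm : k % 2 = 1
    · rw [step a k hk0 hm]
      simp [hk0, hm, List.range_succ]
    · have hm1 : (k - 1) % 2 = 1 := by omega
      have hk1 : k - 1 ≠ 0 := by omega
      rw [array_operations.eq_def]
      simp only [hk0, h2, hm, ite_false]
      rw [step _ (k - 1) hk1 hm1]
      simp [List.range_succ]
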